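-- pv_equiv track=rewrite | github.com/EJahren/my_aoc_solutions | 2015/day16.py | search
-- ===== SOURCE A (Python) =====
-- looking_for = {
--     "children": 3,
--     "cats": 7,
--     "samoyeds": 2,
--     "pomeranians": 3,
--     "akitas": 0,
--     "vizslas": 0,
--     "goldfish": 5,
--     "trees": 3,
--     "cars": 2,
--     "perfumes": 1,
-- }
--
-- def search(inp: list[dict[str, int]]) -> list[int]:
--     prospects = []
--     for sue in inp:
--         is_match = True
--         for key in [
--             "children",
--             "samoyeds",
--             "akitas",
--             "vizslas",
--             "cars",
--             "perfumes",
--         ]: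
--             is_match &= looking_for[key] == sue.get(key, looking_for[key])
--         for key in ["cats", "trees"]:
--             is_match &= looking_for[key] <= sue.get(key, looking_for[key])
--         for key in ["pomeranians", "goldfish"]:
--             is_match &= looking_for[key] >= sue.get(key, looking_for[key])
--
--         if is_match:
--             prospects.append(sue["Sue"])
--     return prospects
-- ===== SOURCE B (Python) =====
-- looking_for = {
--     "children": 3,
--     "cats": 7,
--     "samoyeds": 2,
--     "pomeranians": 3,
--     "akitas": 0,
--     "vizslas": 0,
--     "goldfish": 5,
--     "trees": 3,
--     "cars": 2,
--     "perfumes": 1,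
-- }
--
-- def _ok(v):
--     return True
--
-- # One per-field validator per criterion; a field a Sue does not report is
-- # never checked (it would pass A's test vacuously anyway, since each
-- # looking_for target satisfies its own comparison).
-- CHECKS = {
--     "children": lambda v: v == 3,
--     "samoyeds": lambda v: v == 2,
--     "akitas": lambda v: v == 0,
--     "vizslas": lambda v: v == 0,
--     "cars": lambda v: v == 2,
--     "perfumes": lambda v: v == 1,
--     "cats": lambda v: v >= 7,
--     "trees": lambda v: v >= 3,
--     "pomeranians": lambda v: v <= 3,
--     "goldfish": lambda v: v <= 5,
-- }
--
-- def search(inp: list[dict[str, int]]) -> list[int]: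
--     prospects = []
--     for sue in inp:
--         if all(CHECKS.get(k, _ok)(v) for k, v in sue.items()):
--             prospects.append(sue["Sue"])
--     return prospects
-- ===== Notes on version B (the rewrite author's own statement) =====
-- stated objective: alternative
-- what changed: B traverses each Sue's own reported fields and validates each against a per-field predicate table (unknown fields pass), instead of A's criteria-driven scan over all ten fixed keys with dict.get defaults and an is_match accumulator; equivalent because every absent field passes A's test vacuously.
import Mathlib
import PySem

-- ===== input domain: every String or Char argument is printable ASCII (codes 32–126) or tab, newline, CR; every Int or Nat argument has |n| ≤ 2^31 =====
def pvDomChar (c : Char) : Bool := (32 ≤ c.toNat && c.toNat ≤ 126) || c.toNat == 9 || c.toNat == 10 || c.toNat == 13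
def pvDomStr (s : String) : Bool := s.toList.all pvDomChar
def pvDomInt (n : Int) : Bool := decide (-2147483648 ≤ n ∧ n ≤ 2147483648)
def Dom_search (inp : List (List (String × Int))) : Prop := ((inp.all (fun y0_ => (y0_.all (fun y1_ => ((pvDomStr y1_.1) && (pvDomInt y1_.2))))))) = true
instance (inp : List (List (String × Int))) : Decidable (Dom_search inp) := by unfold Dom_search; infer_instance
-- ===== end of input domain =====

-- B validates each Sue's own reported fields against a per-field predicate table
-- (data-driven traversal) instead of A's scan over the ten fixed criteria with
-- dict.get defaults (alternative decomposition, same result).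

-- ===== PORT A =====
-- the looking_for dict and Python's dict.get(k, default) (first match)
def lookingFor : List (String × Int) :=
  [("children", 3), ("cats", 7), ("samoyeds", 2), ("pomeranians", 3), ("akitas", 0),
   ("vizslas", 0), ("goldfish", 5), ("trees", 3), ("cars", 2), ("perfumes", 1)]

def dictGet (d : List (String × Int)) (k : String) (dflt : Int) : Int :=
  match d.find? (fun p => p.1 == k) with
  | some p => p.2
  | none => dflt

def lfGet (k : String) : Int := dictGet lookingFor k 0

def search (inp : List (List (String × Int))) : List Int :=
  inp.foldl (fun prospects sue =>
    let m1 := (["children", "samoyeds", "akitas", "vizslas", "cars", "perfumes"]).foldl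
      (fun m k => m && (lfGet k == dictGet sue k (lfGet k))) true
    let m2 := (["cats", "trees"]).foldl
      (fun m k => m && decide (lfGet k ≤ dictGet sue k (lfGet k))) m1
    let m3 := (["pomeranians", "goldfish"]).foldl
      (fun m k => m && decide (lfGet k ≥ dictGet sue k (lfGet k))) m2
    -- sue["Sue"] raises KeyError when the key is absent; Pre_search rules that out,
    -- so the default 0 below is never taken on admitted inputs
    if m3 then prospects ++ [dictGet sue "Sue" 0] else prospects) []

-- ===== PORT B =====
-- the CHECKS table of Source B, in Python dict insertion order
def checks : List (String × (Int → Bool)) :=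
  [("children", fun v => v == 3), ("samoyeds", fun v => v == 2),
   ("akitas", fun v => v == 0), ("vizslas", fun v => v == 0),
   ("cars", fun v => v == 2), ("perfumes", fun v => v == 1),
   ("cats", fun v => decide (v ≥ 7)), ("trees", fun v => decide (v ≥ 3)),
   ("pomeranians", fun v => decide (v ≤ 3)), ("goldfish", fun v => decide (v ≤ 5))]

-- CHECKS.get(k, _ok)(v)
def checkField (k : String) (v : Int) : Bool :=
  match checks.find? (fun c => c.1 == k) with
  | some c => c.2 v
  | none => true

def search_alt (inp : List (List (String × Int))) : List Int :=
  inp.foldl (fun prospects sue =>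
    if sue.all (fun p => checkField p.1 p.2) then prospects ++ [dictGet sue "Sue" 0]
    else prospects) []

-- ===== PRECONDITION & SPEC =====
-- Pre_-local copies (Pre_ must not depend on the ports' helpers)
def preGet (d : List (String × Int)) (k : String) (dflt : Int) : Int :=
  match d.find? (fun p => p.1 == k) with
  | some p => p.2
  | none => dflt

def preKeys : List String :=
  ["children", "samoyeds", "akitas", "vizslas", "cars", "perfumes",
   "cats", "trees", "pomeranians", "goldfish"]

def preMatches (sue : List (String × Int)) : Bool :=
  (preGet sue "children" 3 == 3) && (preGet sue "samoyeds" 2 == 2) &&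
  (preGet sue "akitas" 0 == 0) && (preGet sue "vizslas" 0 == 0) &&
  (preGet sue "cars" 2 == 2) && (preGet sue "perfumes" 1 == 1) &&
  decide (7 ≤ preGet sue "cats" 7) && decide (3 ≤ preGet sue "trees" 3) &&
  decide (preGet sue "pomeranians" 3 ≤ 3) && decide (preGet sue "goldfish" 5 ≤ 5)

-- Pre_ excludes (i) the inputs on which A raises: a sue that passes all criteria
-- but has no "Sue" key makes A's sue["Sue"] raise KeyError; (ii) assoc lists with a
-- duplicated criterion key, which cannot arise from a Python dict (duplicate keys are
-- impossible there), so behaviour on them is an accident of the list encoding.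
def Pre_search (inp : List (List (String × Int))) : Prop :=
  ∀ sue ∈ inp,
    ((sue.filter (fun p => preKeys.any (fun k => k == p.1))).map Prod.fst).Nodup ∧
    (preMatches sue → sue.any (fun p => p.1 == "Sue"))
instance (inp : List (List (String × Int))) : Decidable (Pre_search inp) := by
  unfold Pre_search; infer_instance

def pvWitness_search : (List (List (String × Int))) := [[("Sue", 1)], [("cats", 2)]]

def Spec_search (inp : List (List (String × Int))) (out : List Int) : Prop := out = search_alt inp
instance (inp : List (List (String × Int))) (out : List Int) : Decidable (Spec_search inp out) := by
  unfold Spec_search; infer_instance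

-- ===== CLAIM (what is proved, stated in full; the proofs are below) =====
def Claim_equal_search : Prop :=
  ∀ (inp : List (List (String × Int))), Dom_search inp → Pre_search inp → Spec_search inp (search inp)

-- ===== LEMMAS AND PROOFS =====

-- generic per-field check against an arbitrary predicate table
def fieldCheck (cr : List (String × (Int → Bool))) (k : String) (v : Int) : Bool :=
  match cr.find? (fun c => c.1 == k) with
  | some c => c.2 v
  | none => true

theorem checkField_eq_fieldCheck : checkField = fieldCheck checks := rfl

theorem all_congr_mem {α : Type} (l : List α) (p q : α → Bool)
    (h : ∀ x ∈ l, p x = q x) : l.all p = l.all q := by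
  induction l with
  | nil => rfl
  | cons x xs ih =>
    simp only [List.all_cons]
    rw [h x List.mem_cons_self, ih (fun y hy => h y (List.mem_cons_of_mem _ hy))]

theorem fieldCheck_of_not_mem (cr : List (String × (Int → Bool))) (k : String) (v : Int)
    (h : ∀ c ∈ cr, c.1 ≠ k) : fieldCheck cr k v = true := by
  unfold fieldCheck
  rw [List.find?_eq_none.mpr (by intro c hc; simpa using h c hc)]

theorem fieldCheck_cons (c : String × (Int → Bool)) (cr : List (String × (Int → Bool)))
    (k : String) (v : Int) :
    fieldCheck (c :: cr) k v = if c.1 == k then c.2 v else fieldCheck cr k v := by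
  unfold fieldCheck
  by_cases h : c.1 == k <;> simp [List.find?, h]

theorem dictGet_cons (k : String) (v : Int) (rest : List (String × Int)) (key : String) (t : Int) :
    dictGet ((k, v) :: rest) key t = if k == key then v else dictGet rest key t := by
  unfold dictGet
  by_cases h : k == key <;> simp [List.find?, h]

theorem dictGet_of_not_mem (rest : List (String × Int)) (k : String) (t : Int)
    (h : ∀ p ∈ rest, p.1 ≠ k) : dictGet rest k t = t := by
  unfold dictGet
  rw [List.find?_eq_none.mpr (by intro p hp; simpa using h p hp)]

-- consuming one reported field (k, v): the criteria-side conjunction factors into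
-- the per-field check of (k, v) and the criteria-side conjunction over the rest
theorem crit_all_cons (cr : List (String × (Int → Bool))) (lf : String → Int)
    (hnd : (cr.map Prod.fst).Nodup) (hself : ∀ c ∈ cr, c.2 (lf c.1) = true)
    (k : String) (v : Int) (rest : List (String × Int))
    (hk : (∃ c ∈ cr, c.1 = k) → ∀ p ∈ rest, p.1 ≠ k) :
    cr.all (fun c => c.2 (dictGet ((k, v) :: rest) c.1 (lf c.1)))
      = (fieldCheck cr k v && cr.all (fun c => c.2 (dictGet rest c.1 (lf c.1)))) := by
  induction cr with
  | nil => simp [fieldCheck]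
  | cons c cr' ih =>
    have hnd' : (cr'.map Prod.fst).Nodup := (List.nodup_cons.mp hnd).2
    have hself' : ∀ d ∈ cr', d.2 (lf d.1) = true := fun d hd => hself d (List.mem_cons_of_mem _ hd)
    rw [fieldCheck_cons]
    by_cases hck : c.1 = k
    · -- this criterion is the consumed field's criterion
      have hkrest : ∀ p ∈ rest, p.1 ≠ k := hk ⟨c, List.mem_cons_self, hck⟩
      have hnotin : ∀ d ∈ cr', d.1 ≠ k := by
        intro d hd hdk
        exact (List.nodup_cons.mp hnd).1 ((hck.trans hdk.symm) ▸ List.mem_map_of_mem hd)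
      have h2 : cr'.all (fun d => d.2 (dictGet ((k, v) :: rest) d.1 (lf d.1)))
          = cr'.all (fun d => d.2 (dictGet rest d.1 (lf d.1))) := by
        apply all_congr_mem
        intro d hd
        rw [dictGet_cons, if_neg]
        intro h
        exact hnotin d hd ((beq_iff_eq.mp h).symm)
      simp only [List.all_cons]
      rw [if_pos (beq_iff_eq.mpr hck), h2]
      rw [dictGet_cons, if_pos (beq_iff_eq.mpr hck.symm)]
      rw [dictGet_of_not_mem rest c.1 (lf c.1) (fun p hp => hck ▸ hkrest p hp)]
      rw [hself c List.mem_cons_self]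
      simp
    · -- a different criterion: its lookup passes through unchanged
      have hik : (∃ d ∈ cr', d.1 = k) → ∀ p ∈ rest, p.1 ≠ k := by
        rintro ⟨d, hd, hdk⟩; exact hk ⟨d, List.mem_cons_of_mem _ hd, hdk⟩
      simp only [List.all_cons]
      rw [if_neg (by simpa using hck), ih hnd' hself' hik]
      rw [dictGet_cons, if_neg (fun h => hck ((beq_iff_eq.mp h).symm))]
      simp [Bool.and_left_comm]

-- the key equivalence: on a sue without duplicated criterion keys, checking every
-- reported field equals checking every criterion against dict.get with defaults
theorem all_fields_eq (cr : List (String × (Int → Bool))) (lf : String → Int)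
    (hnd : (cr.map Prod.fst).Nodup) (hself : ∀ c ∈ cr, c.2 (lf c.1) = true)
    (sue : List (String × Int))
    (hsue : ((sue.filter (fun p => cr.any (fun c => c.1 == p.1))).map Prod.fst).Nodup) :
    sue.all (fun p => fieldCheck cr p.1 p.2)
      = cr.all (fun c => c.2 (dictGet sue c.1 (lf c.1))) := by
  induction sue with
  | nil =>
    simp only [List.all_nil]
    symm
    rw [List.all_eq_true]
    intro c hc
    rw [dictGet_of_not_mem _ _ _ (by intro p hp; exact absurd hp (List.not_mem_nil))]
    exact hself c hc
  | cons p rest ih =>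
    obtain ⟨k, v⟩ := p
    by_cases hcrit : ∃ c ∈ cr, c.1 = k
    · -- k is a criterion key: it is kept by the filter, so nodup gives uniqueness in rest
      have hkb : cr.any (fun c => c.1 == k) = true := by
        obtain ⟨c, hc, hck⟩ := hcrit
        exact List.any_eq_true.mpr ⟨c, hc, by simpa using hck⟩
      have hfil : (((k, v) :: rest).filter (fun p => cr.any (fun c => c.1 == p.1)))
          = (k, v) :: rest.filter (fun p => cr.any (fun c => c.1 == p.1)) := by
        simp [hkb]
      rw [hfil] at hsue
      simp only [List.map_cons, List.nodup_cons] at hsue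
      have hkrest : ∀ p ∈ rest, p.1 ≠ k := by
        intro q hq hqk
        by_cases hqc : cr.any (fun c => c.1 == q.1) = true
        · exact hsue.1 (by
            rw [← hqk]
            exact List.mem_map_of_mem (List.mem_filter.mpr ⟨hq, hqc⟩))
        · rw [hqk] at hqc; exact hqc hkb
      rw [crit_all_cons cr lf hnd hself k v rest (fun _ => hkrest)]
      simp only [List.all_cons]
      rw [ih hsue.2]
    · -- k reports no criterion: its check is vacuous and no lookup sees it
      push Not at hcrit
      have hkb : cr.any (fun c => c.1 == k) = false := by
        rw [List.any_eq_false]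
        intro c hc
        simpa using hcrit c hc
      have hfil : (((k, v) :: rest).filter (fun p => cr.any (fun c => c.1 == p.1)))
          = rest.filter (fun p => cr.any (fun c => c.1 == p.1)) := by
        simp [hkb]
      rw [hfil] at hsue
      simp only [List.all_cons]
      rw [fieldCheck_of_not_mem cr k v hcrit, ih hsue]
      simp only [Bool.true_and]
      apply all_congr_mem
      intro c hc
      rw [dictGet_cons, if_neg (fun h => hcrit c hc ((beq_iff_eq.mp h).symm))]

theorem int_beq_comm (a b : Int) : (a == b) = (b == a) := by
  by_cases h : a = b
  · rw [h]
  · rw [beq_eq_false_iff_ne.mpr h, beq_eq_false_iff_ne.mpr (Ne.symm h)]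

-- A's chained &= fold over the three key groups equals the criteria-side conjunction
-- for the concrete checks table
theorem abool_eq (sue : List (String × Int)) :
    ((["pomeranians", "goldfish"]).foldl
      (fun m k => m && decide (lfGet k ≥ dictGet sue k (lfGet k)))
      ((["cats", "trees"]).foldl
        (fun m k => m && decide (lfGet k ≤ dictGet sue k (lfGet k)))
        ((["children", "samoyeds", "akitas", "vizslas", "cars", "perfumes"]).foldl
          (fun m k => m && (lfGet k == dictGet sue k (lfGet k))) true)))
    = checks.all (fun c => c.2 (dictGet sue c.1 (lfGet c.1))) := by
  have e1 : lfGet "children" = 3 := by decide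
  have e2 : lfGet "samoyeds" = 2 := by decide
  have e3 : lfGet "akitas" = 0 := by decide
  have e4 : lfGet "vizslas" = 0 := by decide
  have e5 : lfGet "cars" = 2 := by decide
  have e6 : lfGet "perfumes" = 1 := by decide
  have e7 : lfGet "cats" = 7 := by decide
  have e8 : lfGet "trees" = 3 := by decide
  have e9 : lfGet "pomeranians" = 3 := by decide
  have e10 : lfGet "goldfish" = 5 := by decide
  simp only [List.foldl_cons, List.foldl_nil, checks, List.all_cons, List.all_nil,
    e1, e2, e3, e4, e5, e6, e7, e8, e9, e10]
  simp [int_beq_comm, ge_iff_le, Bool.and_assoc]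

-- ===== VERDICT (by name: the statement is the Claim_ definition above) =====
theorem search_spec : Claim_equal_search := by
  intro inp _ hpre
  unfold Spec_search search search_alt
  rw [PySem.List.foldl_append_if, PySem.List.foldl_append_if, List.nil_append, List.nil_append]
  congr 1
  apply List.filter_congr
  intro sue hsue
  have hnd : ((sue.filter (fun p => checks.any (fun c => c.1 == p.1))).map Prod.fst).Nodup := by
    have h := (hpre sue hsue).1
    have hsame : (fun p : String × Int => preKeys.any (fun k => k == p.1))
        = (fun p : String × Int => checks.any (fun c => c.1 == p.1)) := by
      funext p
      simp [preKeys, checks]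
    rwa [hsame] at h
  have hself : ∀ c ∈ checks, c.2 (lfGet c.1) = true := by decide
  have hnodupcr : (checks.map Prod.fst).Nodup := by decide
  rw [abool_eq sue]
  rw [checkField_eq_fieldCheck]
  rw [all_fields_eq checks lfGet hnodupcr hself sue hnd]
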